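-- pv_equiv track=rewrite | github.com/jinlibao/toolkits | Project.Euler/Answers.Python/53.py | combinatoricSelection
-- ===== SOURCE A (Python) =====
-- def factorial(n):
-- 	if n <= 1:
-- 		return 1
-- 	product = 1
-- 	while n > 1:
-- 		product *= n
-- 		n -= 1
-- 	return product
--
-- def NChooseR(N, R):
-- 	#nchooser = fSeries[N] / (fSeries[R] * fSeries[N-R])
-- 	nchooser = factorial(N) // (factorial(R) * factorial(N-R))
-- 	return nchooser
--
-- def combinatoricSelection(start, end, BOUND):
-- 	n = range(start, end+1)
-- 	selectedSeries = []
-- 	for i in n: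
-- 		r = range(i)
-- 		for j in r:
-- 			nchooser = NChooseR(i, j)
-- 			if nchooser > BOUND:
-- 				selectedSeries.append((i, j, nchooser))
-- 	return (len(selectedSeries), selectedSeries)
-- ===== SOURCE B (Python) =====
-- def combinatoricSelection(start, end, BOUND):
--     # Pascal-row style: build C(i, j) incrementally with the multiplicative
--     # formula instead of computing three factorials per pair.
--     selectedSeries = []
--     for i in range(start, end + 1):
--         c = 1
--         for j in range(i):
--             if c > BOUND:
--                 selectedSeries.append((i, j, c))
--             c = c * (i - j) // (j + 1)
--     return (len(selectedSeries), selectedSeries)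
-- ===== Notes on version B (the rewrite author's own statement) =====
-- stated objective: alternative
-- what changed: Replaces the per-pair three-factorial computation with an incremental multiplicative binomial recurrence C(i,j+1)=C(i,j)*(i-j)//(j+1) carried along the inner loop, so each coefficient costs O(1) big-int steps instead of O(i) factorial products; intended as faster (O(n^2) vs O(n^3) multiplications) but a timing run could not confirm it on its input family, so no speed is claimed.
import Mathlib
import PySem

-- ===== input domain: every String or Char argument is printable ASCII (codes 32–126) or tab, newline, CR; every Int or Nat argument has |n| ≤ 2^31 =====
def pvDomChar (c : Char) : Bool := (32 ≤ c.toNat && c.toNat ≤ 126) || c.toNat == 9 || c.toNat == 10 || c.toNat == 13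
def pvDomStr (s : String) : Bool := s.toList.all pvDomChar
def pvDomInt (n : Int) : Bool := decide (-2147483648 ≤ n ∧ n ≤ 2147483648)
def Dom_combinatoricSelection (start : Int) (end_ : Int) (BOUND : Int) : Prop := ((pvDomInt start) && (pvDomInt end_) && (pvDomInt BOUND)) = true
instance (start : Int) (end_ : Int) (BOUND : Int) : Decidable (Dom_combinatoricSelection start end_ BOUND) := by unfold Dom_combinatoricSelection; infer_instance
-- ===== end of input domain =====

-- B replaces A's per-pair three-factorial computation by an incremental
-- multiplicative binomial recurrence carried along the inner loop.

-- ===== PORT A =====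
-- the 'while n > 1: product *= n; n -= 1' loop of A's factorial
def factWhile (n : Int) (product : Int) : Int :=
  if 1 < n then factWhile (n - 1) (product * n) else product
termination_by n.toNat
decreasing_by omega

def factorialA (n : Int) : Int :=
  if n ≤ 1 then 1 else factWhile n 1

def nChooseR (N : Int) (R : Int) : Int :=
  PySem.Int.floordiv (factorialA N) (factorialA R * factorialA (N - R))

def combinatoricSelection (start : Int) (end_ : Int) (BOUND : Int) : Int × (List (Int × Int × Int)) :=
  let selectedSeries :=
    (PySem.List.pyRange start (end_ + 1) 1).foldl (fun acc i =>
      (PySem.List.pyRange 0 i 1).foldl (fun acc2 j =>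
        let nchooser := nChooseR i j
        if nchooser > BOUND then acc2 ++ [(i, j, nchooser)] else acc2) acc) []
  ((selectedSeries.length : Int), selectedSeries)

-- ===== PORT B =====
def combinatoricSelection_alt (start : Int) (end_ : Int) (BOUND : Int) : Int × (List (Int × Int × Int)) :=
  let selectedSeries :=
    (PySem.List.pyRange start (end_ + 1) 1).foldl (fun acc i =>
      ((PySem.List.pyRange 0 i 1).foldl (fun (s : Int × List (Int × Int × Int)) j =>
        let acc2 := if s.1 > BOUND then s.2 ++ [(i, j, s.1)] else s.2
        (PySem.Int.floordiv (s.1 * (i - j)) (j + 1), acc2)) (1, acc)).2) []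
  ((selectedSeries.length : Int), selectedSeries)

-- ===== PRECONDITION & SPEC =====
def Spec_combinatoricSelection (start : Int) (end_ : Int) (BOUND : Int) (out : Int × (List (Int × Int × Int))) : Prop := out = combinatoricSelection_alt start end_ BOUND
instance (start : Int) (end_ : Int) (BOUND : Int) (out : Int × (List (Int × Int × Int))) : Decidable (Spec_combinatoricSelection start end_ BOUND out) := by unfold Spec_combinatoricSelection; infer_instance

-- ===== CLAIM (what is proved, stated in full; the proofs are below) =====
def Claim_equal_combinatoricSelection : Prop := ∀ (start : Int) (end_ : Int) (BOUND : Int), Dom_combinatoricSelection start end_ BOUND → Spec_combinatoricSelection start end_ BOUND (combinatoricSelection start end_ BOUND)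

-- ===== LEMMAS AND PROOFS =====

-- A's factorial computes the mathematical factorial on nonnegative input
lemma factWhile_eq (n : Int) (hn : 1 ≤ n) : ∀ p : Int, factWhile n p = p * (Nat.factorial n.toNat : Int) := by
  induction n, hn using Int.le_induction with
  | base => intro p; rw [factWhile]; norm_num [Nat.factorial]
  | succ n hn ih =>
    intro p
    rw [factWhile]
    have h1 : 1 < n + 1 := by omega
    have h2 : (n + 1).toNat = n.toNat + 1 := by omega
    simp only [if_pos h1, add_sub_cancel_right, ih, h2, Nat.factorial_succ]
    have h3 : (n.toNat : Int) = n := by omega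
    push_cast
    rw [h3]; ring

lemma factorialA_eq (n : Int) (hn : 0 ≤ n) : factorialA n = (Nat.factorial n.toNat : Int) := by
  unfold factorialA
  split_ifs with h
  · interval_cases n <;> simp
  · rw [factWhile_eq n (by omega), one_mul]

-- A's NChooseR is the binomial coefficient
lemma nChooseR_eq (i j : Int) (hj : 0 ≤ j) (hji : j ≤ i) :
    nChooseR i j = (Nat.choose i.toNat j.toNat : Int) := by
  unfold nChooseR
  rw [factorialA_eq i (by omega), factorialA_eq j hj, factorialA_eq (i - j) (by omega)]
  have hle : j.toNat ≤ i.toNat := by omega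
  have hij : (i - j).toNat = i.toNat - j.toNat := by omega
  have hfact : i.toNat.factorial
      = i.toNat.choose j.toNat * (j.toNat.factorial * (i - j).toNat.factorial) := by
    rw [hij, ← mul_assoc, Nat.choose_mul_factorial_mul_factorial hle]
  have hpos : (0 : Int) < (j.toNat.factorial * (i - j).toNat.factorial : Nat) := by
    positivity
  rw [PySem.Int.floordiv_eq_ediv_of_pos (by exact_mod_cast hpos), hfact]
  push_cast
  rw [Int.mul_ediv_cancel _ (by positivity)]

-- the multiplicative step of B
lemma choose_step (i j : Int) (hj : 0 ≤ j) (hji : j < i) :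
    PySem.Int.floordiv ((Nat.choose i.toNat j.toNat : Int) * (i - j)) (j + 1)
      = (Nat.choose i.toNat (j + 1).toNat : Int) := by
  have key : (Nat.choose i.toNat j.toNat : Int) * (i - j)
      = (Nat.choose i.toNat (j + 1).toNat : Int) * (j + 1) := by
    have h := Nat.choose_succ_right_eq i.toNat j.toNat
    have h1 : (j + 1).toNat = j.toNat + 1 := by omega
    have h2 : (i - j) = ((i.toNat - j.toNat : Nat) : Int) := by omega
    have h3 : (j + 1) = ((j.toNat + 1 : Nat) : Int) := by omega
    rw [h1, h2, h3]
    exact_mod_cast h.symm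
  rw [key, PySem.Int.floordiv_eq_ediv_of_pos (by omega),
    Int.mul_ediv_cancel _ (by omega)]

-- inner loops agree, given B's accumulator holds C(i, j)
lemma inner_eq (i BOUND : Int) : ∀ (k : Nat) (j : Int) (acc : List (Int × Int × Int)),
    0 ≤ j → j + (k : Int) = i →
    ((PySem.List.pyRange j i 1).foldl (fun (s : Int × List (Int × Int × Int)) j' =>
        let acc2 := if s.1 > BOUND then s.2 ++ [(i, j', s.1)] else s.2
        (PySem.Int.floordiv (s.1 * (i - j')) (j' + 1), acc2))
      ((Nat.choose i.toNat j.toNat : Int), acc)).2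
    = (PySem.List.pyRange j i 1).foldl (fun acc2 j' =>
        let nchooser := nChooseR i j'
        if nchooser > BOUND then acc2 ++ [(i, j', nchooser)] else acc2) acc := by
  intro k
  induction k with
  | zero =>
    intro j acc hj hk
    rw [PySem.List.pyRange_one_eq_nil (by omega)]
    rfl
  | succ k ih =>
    intro j acc hj hk
    have hji : j < i := by omega
    rw [PySem.List.pyRange_one_cons hji]
    simp only [List.foldl_cons]
    rw [choose_step i j hj hji, nChooseR_eq i j hj (by omega)]
    exact ih (j + 1) _ (by omega) (by omega)

-- the outer folds agree (pointwise equal inner folds for every i and accumulator)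
lemma foldl_outer_eq (start end_ BOUND : Int) :
    (PySem.List.pyRange start (end_ + 1) 1).foldl (fun acc i =>
      (PySem.List.pyRange 0 i 1).foldl (fun acc2 j =>
        let nchooser := nChooseR i j
        if nchooser > BOUND then acc2 ++ [(i, j, nchooser)] else acc2) acc) []
    = (PySem.List.pyRange start (end_ + 1) 1).foldl (fun acc i =>
      ((PySem.List.pyRange 0 i 1).foldl (fun (s : Int × List (Int × Int × Int)) j =>
        let acc2 := if s.1 > BOUND then s.2 ++ [(i, j, s.1)] else s.2
        (PySem.Int.floordiv (s.1 * (i - j)) (j + 1), acc2)) (1, acc)).2) [] := by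
  have hstep : ∀ (i : Int) (acc : List (Int × Int × Int)),
      (PySem.List.pyRange 0 i 1).foldl (fun acc2 j =>
        let nchooser := nChooseR i j
        if nchooser > BOUND then acc2 ++ [(i, j, nchooser)] else acc2) acc
      = ((PySem.List.pyRange 0 i 1).foldl (fun (s : Int × List (Int × Int × Int)) j =>
        let acc2 := if s.1 > BOUND then s.2 ++ [(i, j, s.1)] else s.2
        (PySem.Int.floordiv (s.1 * (i - j)) (j + 1), acc2)) (1, acc)).2 := by
    intro i acc
    by_cases hi : i ≤ 0
    · rw [PySem.List.pyRange_one_eq_nil hi]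
      rfl
    · have := inner_eq i BOUND i.toNat 0 acc (by omega) (by omega)
      simp only [Int.toNat_zero, Nat.choose_zero_right, Nat.cast_one] at this
      exact this.symm
  induction PySem.List.pyRange start (end_ + 1) 1 using List.reverseRecOn with
  | nil => rfl
  | append_singleton l x ih =>
    simp only [List.foldl_append, List.foldl_cons, List.foldl_nil]
    rw [ih, hstep]

-- ===== VERDICT (by name: the statement is the Claim_ definition above) =====
theorem combinatoricSelection_spec : Claim_equal_combinatoricSelection := by
  intro start end_ BOUND _
  unfold Spec_combinatoricSelection combinatoricSelection combinatoricSelection_alt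
  rw [foldl_outer_eq start end_ BOUND]
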